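-- pv_equiv track=rewrite | github.com/FabioFukuda/Trabalho1BD | interpretador.py | interpretarSelect
-- ===== SOURCE A (Python) =====
-- def interpretarSelect(select_):
--     interpretacaoSelect = {'nome':[],
--                     'alias':[],
--                     'tabela':[]}
--
--     camposSeparados = []
--     campo = []
--     for comando in select_:
--         if comando == ',':
--             camposSeparados.append(campo)
--             campo = []
--         else:
--             campo.append(comando)
--     camposSeparados.append(campo)
--
--     for campo in camposSeparados:
--         proximoCampo = 'nome'
--         nome = ''
--         alias = ''
--         tabela = ''
--         for comando in campo:
--             if proximoCampo == 'nome':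
--                 if '.' in comando:
--                     tabela,nome = comando.split('.')
--                 else:
--                     nome = comando
--                 proximoCampo = 'alias'
--                 continue
--             if comando == 'as':
--                 continue
--             elif proximoCampo == 'alias':
--                 alias = comando
--         if alias == '':
--             alias = nome
--         interpretacaoSelect['alias'].append(alias)
--         interpretacaoSelect['nome'].append(nome)
--         interpretacaoSelect['tabela'].append(tabela)
--
--     return interpretacaoSelect
-- ===== SOURCE B (Python) =====
-- def _campo(f):
--     if not f:
--         tabela, nome = '', ''
--     elif '.' in f[0]:
--         tabela, nome = f[0].split('.')
--     else:
--         tabela, nome = '', f[0]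
--     resto = [t for t in f[1:] if t != 'as']
--     alias = resto[-1] if resto and resto[-1] != '' else nome
--     return nome, alias, tabela
--
-- def interpretarSelect(select_):
--     campos = []
--     resto = select_
--     while ',' in resto:
--         k = resto.index(',')
--         campos.append(resto[:k])
--         resto = resto[k+1:]
--     campos.append(resto)
--     triplas = [_campo(f) for f in campos]
--     return {'nome': [t[0] for t in triplas],
--             'alias': [t[1] for t in triplas],
--             'tabela': [t[2] for t in triplas]}
-- ===== Notes on version B (the rewrite author's own statement) =====
-- stated objective: alternative
-- what changed: Replaces A's per-token state machine (proximoCampo flag, comma accumulator, dict-of-lists appends) with index-based field slicing and a direct per-field computation: name/table from the first token, alias as the last non-'as' trailing token with fallback to the name.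
import Mathlib
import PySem

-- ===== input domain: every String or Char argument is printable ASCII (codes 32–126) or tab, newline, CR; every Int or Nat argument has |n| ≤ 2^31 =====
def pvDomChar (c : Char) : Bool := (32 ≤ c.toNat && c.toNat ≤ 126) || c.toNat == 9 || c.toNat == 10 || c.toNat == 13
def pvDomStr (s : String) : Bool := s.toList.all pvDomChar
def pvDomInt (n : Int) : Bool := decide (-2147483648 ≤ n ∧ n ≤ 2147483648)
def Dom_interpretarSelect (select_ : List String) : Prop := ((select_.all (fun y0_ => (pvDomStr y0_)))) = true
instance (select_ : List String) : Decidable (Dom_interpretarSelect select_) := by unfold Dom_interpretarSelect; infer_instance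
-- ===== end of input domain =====

-- B replaces A's per-token state machine with index-based field slicing and a direct per-field computation (alternative decomposition, same cost).

-- ===== PORT A =====
-- state: (camposSeparados, campo)
def pvASplitStep (st : List (List String) × List String) (comando : String) :
    List (List String) × List String :=
  if comando = "," then (st.1 ++ [st.2], []) else (st.1, st.2 ++ [comando])

-- state: (proximoCampo, nome, aliasV, tabela)
def pvAInnerStep (s : String × String × String × String) (comando : String) :
    String × String × String × String :=
  if s.1 = "nome" then
    (if PySem.Str.isIn "." comando then
       -- 'tabela,nome = comando.split(".")': exactly two parts under Pre_, read via getD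
       let ps := (PySem.Str.split? comando ".").getD []
       ("alias", ps.getD 1 "", s.2.2.1, ps.getD 0 "")
     else ("alias", comando, s.2.2.1, s.2.2.2))
  else if comando = "as" then s
  else if s.1 = "alias" then (s.1, s.2.1, comando, s.2.2.2)
  else s

-- state: (nome-list, alias-list, tabela-list) of the result dict
def pvAOuterStep (acc : List String × List String × List String) (campo : List String) :
    List String × List String × List String :=
  let r := campo.foldl pvAInnerStep ("nome", "", "", "")
  let nome := r.2.1
  let aliasV := if r.2.2.1 = "" then nome else r.2.2.1
  (acc.1 ++ [nome], acc.2.1 ++ [aliasV], acc.2.2 ++ [r.2.2.2])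

def interpretarSelect (select_ : List String) : List (String × List String) :=
  let st := select_.foldl pvASplitStep ([], [])
  let camposSeparados := st.1 ++ [st.2]
  let fin := camposSeparados.foldl pvAOuterStep ([], [], [])
  [("nome", fin.1), ("alias", fin.2.1), ("tabela", fin.2.2)]

-- ===== PORT B =====
-- while ',' in resto: k = resto.index(','); campos.append(resto[:k]); resto = resto[k+1:]
def pvSplitVirgula (resto : List String) : List (List String) :=
  if h : "," ∈ resto then
    let k := (PySem.List.index? resto ",").getD 0
    resto.take k :: pvSplitVirgula (resto.drop (k + 1))
  else [resto]
termination_by resto.length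
decreasing_by
  have hne : resto ≠ [] := List.ne_nil_of_mem h
  have : 0 < resto.length := List.length_pos_iff.mpr hne
  simp only [List.length_drop]; omega

def pvCampo (f : List String) : String × String × String :=
  let tn : String × String :=
    match f with
    | [] => ("", "")
    | c :: _ =>
      if PySem.Str.isIn "." c then
        -- 'tabela, nome = f[0].split(".")': exactly two parts under Pre_, read via getD
        let ps := (PySem.Str.split? c ".").getD []
        (ps.getD 0 "", ps.getD 1 "")
      else ("", c)
  let resto := (f.drop 1).filter (fun t => t ≠ "as")
  let aliasV :=
    match resto.getLast? with
    | some a => if a = "" then tn.2 else a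
    | none => tn.2
  (tn.2, aliasV, tn.1)

def interpretarSelect_alt (select_ : List String) : List (String × List String) :=
  let triplas := (pvSplitVirgula select_).map pvCampo
  [("nome", triplas.map (·.1)), ("alias", triplas.map (·.2.1)), ("tabela", triplas.map (·.2.2))]

-- ===== PRECONDITION & SPEC =====
-- Pre_ excludes exactly the inputs where Python A raises (ValueError): a token that starts a
-- field (index 0 or right after ',') containing two or more '.' makes the 2-tuple unpack of
-- split('.') fail.  (B raises there too.)
def Pre_interpretarSelect (select_ : List String) : Prop :=
  ∀ i, i < select_.length → (i = 0 ∨ select_.getD (i - 1) "" = ",") →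
    PySem.Str.count (select_.getD i "") "." ≤ 1

instance (select_ : List String) : Decidable (Pre_interpretarSelect select_) := by
  unfold Pre_interpretarSelect; infer_instance

def pvWitness_interpretarSelect : List String := ["t.a", "as", "x", ",", "b"]

def Spec_interpretarSelect (select_ : List String) (out : List (String × List String)) : Prop := out = interpretarSelect_alt select_
instance (select_ : List String) (out : List (String × List String)) : Decidable (Spec_interpretarSelect select_ out) := by unfold Spec_interpretarSelect; infer_instance

-- ===== CLAIM (what is proved, stated in full; the proofs are below) =====
def Claim_equal_interpretarSelect : Prop := ∀ (select_ : List String), Dom_interpretarSelect select_ → Pre_interpretarSelect select_ → Spec_interpretarSelect select_ (interpretarSelect select_)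

-- ===== LEMMAS AND PROOFS =====

-- prepend tokens to the first field of a nonempty field list
def pvConsAll (cur : List String) : List (List String) → List (List String)
  | [] => [cur]
  | h :: r => (cur ++ h) :: r

theorem pvSplit_nil : pvSplitVirgula [] = [[]] := by
  unfold pvSplitVirgula; simp

theorem pvLastD_cons (l : List String) (r a : String) :
    ((r :: l).getLast?).getD a = (l.getLast?).getD r := by
  cases l with
  | nil => simp
  | cons x xs =>
    obtain ⟨y, hy⟩ := Option.isSome_iff_exists.mp (List.getLast?_isSome.mpr (List.cons_ne_nil x xs))
    rw [List.getLast?_cons_cons, hy]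
    simp

theorem pvSplit_cons (t : String) (ts : List String) :
    pvSplitVirgula (t :: ts) =
      if t = "," then [] :: pvSplitVirgula ts else pvConsAll [t] (pvSplitVirgula ts) := by
  by_cases ht : t = ","
  · subst ht
    rw [pvSplitVirgula, dif_pos (show ("," : String) ∈ "," :: ts by simp)]
    simp [List.idxOf?_cons]
  · rw [if_neg ht]
    by_cases hm : "," ∈ ts
    · obtain ⟨k, hk⟩ := Option.isSome_iff_exists.mp ((PySem.List.index?_isSome_iff ts ",").mpr hm)
      conv_lhs => rw [pvSplitVirgula, dif_pos (show "," ∈ t :: ts from List.mem_cons_of_mem _ hm)]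
      conv_rhs => rw [pvSplitVirgula, dif_pos hm]
      rw [PySem.List.index?_eq_idxOf?] at hk
      simp only [PySem.List.index?_cons_of_ne _ ht, PySem.List.index?_eq_idxOf?, hk,
        Option.map_some, Option.getD_some, List.take_succ_cons, List.drop_succ_cons, pvConsAll]
      simp
    · rw [pvSplitVirgula, dif_neg (show ¬ "," ∈ t :: ts by simp [Ne.symm ht, hm])]
      rw [pvSplitVirgula, dif_neg hm]
      simp [pvConsAll]

theorem pvSplit_ne_nil (ts : List String) : pvSplitVirgula ts ≠ [] := by
  unfold pvSplitVirgula; split <;> simp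

theorem pvFoldSplit (ts : List String) : ∀ (acc : List (List String)) (cur : List String),
    (let st := ts.foldl pvASplitStep (acc, cur); st.1 ++ [st.2]) =
      acc ++ pvConsAll cur (pvSplitVirgula ts) := by
  induction ts with
  | nil => intro acc cur; simp [pvSplit_nil, pvConsAll]
  | cons t ts ih =>
    intro acc cur
    obtain ⟨h0, r0, hr⟩ := List.exists_cons_of_ne_nil (pvSplit_ne_nil ts)
    by_cases ht : t = ","
    · subst ht
      simp only [List.foldl_cons, pvASplitStep, if_true]
      rw [ih]
      simp [pvSplit_cons, pvConsAll, hr]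
    · simp only [List.foldl_cons, pvASplitStep, if_neg ht]
      rw [ih]
      simp [pvSplit_cons, ht, pvConsAll, hr]

theorem pvInnerAlias (rest : List String) : ∀ n a t : String,
    rest.foldl pvAInnerStep ("alias", n, a, t) =
      ("alias", n, ((rest.filter (fun t => t ≠ "as")).getLast?).getD a, t) := by
  induction rest with
  | nil => intro n a t; simp
  | cons r rs ih =>
    intro n a t
    have hstep : pvAInnerStep ("alias", n, a, t) r =
        (if r = "as" then ("alias", n, a, t) else ("alias", n, r, t)) := by
      simp [pvAInnerStep]
    by_cases hr : r = "as"
    · subst hr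
      rw [List.foldl_cons, hstep, if_pos rfl, ih, List.filter_cons_of_neg (by simp)]
    · rw [List.foldl_cons, hstep, if_neg hr, ih]
      congr 2
      rw [List.filter_cons_of_pos (by simp [hr])]
      rw [pvLastD_cons]

theorem pvFieldEq (campo : List String) :
    (let r := campo.foldl pvAInnerStep ("nome", "", "", "");
     (r.2.1, (if r.2.2.1 = "" then r.2.1 else r.2.2.1), r.2.2.2)) = pvCampo campo := by
  cases campo with
  | nil => simp [pvCampo]
  | cons c rest =>
    simp only [List.foldl_cons]
    have hstep : pvAInnerStep ("nome", "", "", "") c =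
        (if PySem.Str.isIn "." c then
           let ps := (PySem.Str.split? c ".").getD []
           ("alias", ps.getD 1 "", "", ps.getD 0 "")
         else ("alias", c, "", "")) := by
      simp [pvAInnerStep]
    rw [hstep]
    by_cases hdot : PySem.Str.isIn "." c
    · rw [if_pos hdot]
      rw [pvInnerAlias]
      simp only [pvCampo, if_pos hdot, List.drop_succ_cons, List.drop_zero]
      cases hl : ((rest.filter (fun t => t ≠ "as")).getLast?) <;> simp
    · rw [if_neg hdot]
      rw [pvInnerAlias]
      simp only [pvCampo, if_neg hdot, List.drop_succ_cons, List.drop_zero]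
      cases hl : ((rest.filter (fun t => t ≠ "as")).getLast?) <;> simp

theorem pvOuterEq (campos : List (List String)) :
    ∀ (a b c : List String),
    campos.foldl pvAOuterStep (a, b, c) =
      (a ++ (campos.map pvCampo).map (·.1),
       b ++ (campos.map pvCampo).map (·.2.1),
       c ++ (campos.map pvCampo).map (·.2.2)) := by
  induction campos with
  | nil => intro a b c; simp
  | cons campo campos ih =>
    intro a b c
    have h := pvFieldEq campo
    simp only at h
    simp only [List.foldl_cons, pvAOuterStep]
    rw [ih]
    rw [Prod.ext_iff, Prod.ext_iff] at h
    simp only [List.map_cons]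
    rw [← h.1, ← h.2.1, ← h.2.2]
    simp

-- ===== VERDICT (by name: the statement is the Claim_ definition above) =====
theorem interpretarSelect_spec : Claim_equal_interpretarSelect := by
  intro select_ _ _
  unfold Spec_interpretarSelect interpretarSelect interpretarSelect_alt
  have hsplit := pvFoldSplit select_ [] []
  simp only at hsplit
  obtain ⟨h0, r0, hr⟩ := List.exists_cons_of_ne_nil (pvSplit_ne_nil select_)
  rw [hr] at hsplit ⊢
  simp only [pvConsAll, List.nil_append] at hsplit
  simp only [hsplit, pvOuterEq]
  simp
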